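-- pv_equiv track=rewrite | github.com/mihirkalyan/CS520_LAB_ASSIGNMENT | backend/services/yolo_service.py | count_vehicles
-- ===== SOURCE A (Python) =====
-- def count_vehicles(detections: list) -> dict:
--     """
--     Filter detections to vehicle classes and return aggregated counts.
--     Returns: { cars, trucks, motorcycles, total }
--     """
--     cars = trucks = motorcycles = 0
--
--     for d in detections:
--         cls_id = d["class_id"]
--         if cls_id == 2:                  # car
--             cars += 1
--         elif cls_id in (5, 7):           # bus or truck
--             trucks += 1
--         elif cls_id == 3:                # motorcycle
--             motorcycles += 1
--
--     return {
--         "cars":        cars,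
--         "trucks":      trucks,
--         "motorcycles": motorcycles,
--         "total":       cars + trucks + motorcycles,
--     }
-- ===== SOURCE B (Python) =====
-- def count_vehicles(detections: list) -> dict:
--     # Tally class ids in one dict pass, then aggregate by lookup.
--     counts = {}
--     for d in detections:
--         k = d["class_id"]
--         counts[k] = counts.get(k, 0) + 1
--     cars = counts.get(2, 0)
--     trucks = counts.get(5, 0) + counts.get(7, 0)
--     motorcycles = counts.get(3, 0)
--     return {
--         "cars":        cars,
--         "trucks":      trucks,
--         "motorcycles": motorcycles,
--         "total":       cars + trucks + motorcycles,
--     }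
-- ===== Notes on version B (the rewrite author's own statement) =====
-- stated objective: idiomatic
-- what changed: Replaces A's per-element if/elif branch cascade over three named accumulators with a single frequency-table pass (tally all class_ids in a dict) followed by lookups that aggregate cars/trucks/motorcycles.
import Mathlib
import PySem

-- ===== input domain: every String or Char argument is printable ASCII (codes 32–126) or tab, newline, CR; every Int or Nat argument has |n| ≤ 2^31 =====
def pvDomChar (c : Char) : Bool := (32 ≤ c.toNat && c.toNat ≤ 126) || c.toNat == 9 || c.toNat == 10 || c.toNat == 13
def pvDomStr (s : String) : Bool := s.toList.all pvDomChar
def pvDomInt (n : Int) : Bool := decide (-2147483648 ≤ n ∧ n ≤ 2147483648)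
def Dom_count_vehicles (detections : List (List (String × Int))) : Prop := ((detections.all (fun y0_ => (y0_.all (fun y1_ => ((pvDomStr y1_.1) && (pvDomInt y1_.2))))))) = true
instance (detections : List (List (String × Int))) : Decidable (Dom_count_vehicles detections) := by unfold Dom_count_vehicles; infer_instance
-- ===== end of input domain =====

-- B replaces A's if/elif cascade over three counters by one dict tally pass plus aggregating lookups (idiomatic, same cost).

-- shared helper: d["class_id"] in total form (Pre_ guarantees the key is present, so the default is never used)
def pvKey (d : List (String × Int)) : Int := ((PySem.Dict.mk d).get? "class_id").getD 0

-- ===== PORT A =====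
def count_vehicles (detections : List (List (String × Int))) : List (String × Int) :=
  let s := detections.foldl (fun (acc : Int × Int × Int) d =>
    let cls_id := pvKey d
    if cls_id == 2 then (acc.1 + 1, acc.2.1, acc.2.2)
    else if cls_id == 5 || cls_id == 7 then (acc.1, acc.2.1 + 1, acc.2.2)
    else if cls_id == 3 then (acc.1, acc.2.1, acc.2.2 + 1)
    else acc) (0, 0, 0)
  [("cars", s.1), ("trucks", s.2.1), ("motorcycles", s.2.2), ("total", s.1 + s.2.1 + s.2.2)]

-- ===== PORT B =====
def count_vehicles_alt (detections : List (List (String × Int))) : List (String × Int) :=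
  let counts : PySem.Dict Int Int := detections.foldl (fun c d =>
    PySem.Dict.insert c (pvKey d) (PySem.Dict.getD c (pvKey d) 0 + 1)) PySem.Dict.empty
  let cars := PySem.Dict.getD counts 2 0
  let trucks := PySem.Dict.getD counts 5 0 + PySem.Dict.getD counts 7 0
  let motorcycles := PySem.Dict.getD counts 3 0
  [("cars", cars), ("trucks", trucks), ("motorcycles", motorcycles), ("total", cars + trucks + motorcycles)]

-- ===== PRECONDITION & SPEC =====
-- Pre_ excludes detections missing the "class_id" key, on which both Pythons raise KeyError.
def Pre_count_vehicles (detections : List (List (String × Int))) : Prop :=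
  ∀ d ∈ detections, (PySem.Dict.mk d).contains "class_id" = true
instance (detections : List (List (String × Int))) : Decidable (Pre_count_vehicles detections) := by unfold Pre_count_vehicles; infer_instance

def pvWitness_count_vehicles : (List (List (String × Int))) := [[("class_id", 2)], [("class_id", 7), ("conf", 1)]]

def Spec_count_vehicles (detections : List (List (String × Int))) (out : List (String × Int)) : Prop := out = count_vehicles_alt detections
instance (detections : List (List (String × Int))) (out : List (String × Int)) : Decidable (Spec_count_vehicles detections out) := by unfold Spec_count_vehicles; infer_instance

-- ===== CLAIM (what is proved, stated in full; the proofs are below) =====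
def Claim_equal_count_vehicles : Prop := ∀ (detections : List (List (String × Int))), Dom_count_vehicles detections → Pre_count_vehicles detections → Spec_count_vehicles detections (count_vehicles detections)

-- ===== LEMMAS AND PROOFS =====

-- A's fold computes, for each vehicle class, a count over the extracted class ids.
theorem pvA_fold (ds : List (List (String × Int))) (c t m : Int) :
    ds.foldl (fun (acc : Int × Int × Int) d =>
      let cls_id := pvKey d
      if cls_id == 2 then (acc.1 + 1, acc.2.1, acc.2.2)
      else if cls_id == 5 || cls_id == 7 then (acc.1, acc.2.1 + 1, acc.2.2)
      else if cls_id == 3 then (acc.1, acc.2.1, acc.2.2 + 1)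
      else acc) (c, t, m)
    = (c + ((ds.map pvKey).count 2 : Nat),
       t + (((ds.map pvKey).count 5 : Nat) + ((ds.map pvKey).count 7 : Nat)),
       m + ((ds.map pvKey).count 3 : Nat)) := by
  induction ds generalizing c t m with
  | nil => simp
  | cons d ds ih =>
    simp only [List.foldl_cons, List.map_cons, List.count_cons]
    split_ifs with h1 h2 h3 <;>
      simp_all [Prod.ext_iff, beq_iff_eq] <;> omega

-- B's tally fold is a counter: each lookup is a count over the extracted class ids.
theorem pvB_fold (ds : List (List (String × Int))) (c : PySem.Dict Int Int) (v : Int) :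
    PySem.Dict.getD (ds.foldl (fun c d =>
        PySem.Dict.insert c (pvKey d) (PySem.Dict.getD c (pvKey d) 0 + 1)) c) v 0
    = PySem.Dict.getD c v 0 + ((ds.map pvKey).count v : Nat) := by
  induction ds generalizing c with
  | nil => simp
  | cons d ds ih =>
    rw [List.foldl_cons, ih, PySem.Dict.getD_insert]
    simp only [List.map_cons, List.count_cons]
    by_cases h : v = pvKey d
    · simp only [h, beq_self_eq_true, if_pos]
      push_cast
      omega
    · have : (pvKey d == v) = false := by simp [Ne.symm h]
      simp only [if_neg h, this, if_neg Bool.false_ne_true]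
      push_cast
      omega

-- ===== VERDICT (by name: the statement is the Claim_ definition above) =====
theorem count_vehicles_spec : Claim_equal_count_vehicles := by
  intro ds _ _
  unfold Spec_count_vehicles count_vehicles count_vehicles_alt
  simp only [pvA_fold, pvB_fold, PySem.Dict.getD_empty]
  norm_num
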